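-- pv_equiv track=rewrite | github.com/fyrkantis/ISOBot | Backups/ISOBot1.py | listFormats
-- ===== SOURCE A (Python) =====
-- def useFormat(separators, values):
-- 	send = separators[0]
-- 	for i in range(len(values)):
-- 		send += str(values[i])
-- 		send += separators[i + 1]
-- 	return send
--
-- def listFormats(optns, lines):
-- 	send = ""
-- 	for i in range(len(optns)):
-- 		send += f"´{useFormat(lines, optns[i])}´"
-- 		if i + 2 < len(optns):
-- 			send += ", "
-- 		elif i + 2 == len(optns):
-- 			send += " or "
--
-- 	return send
-- ===== SOURCE B (Python) =====
-- def listFormats(optns, lines):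
-- 	out = []
-- 	k = 0
-- 	tail = lines[1:]
-- 	for o in reversed(optns):
-- 		if k == 1:
-- 			out.append(" or ")
-- 		elif k >= 2:
-- 			out.append(", ")
-- 		out.append("\u00b4" + lines[0] + "".join(v + s for v, s in zip(o, tail)) + "\u00b4")
-- 		k += 1
-- 	out.reverse()
-- 	return "".join(out)
-- ===== Notes on version B (the rewrite author's own statement) =====
-- stated objective: alternative
-- what changed: B traverses optns in reverse, choosing each separator from its distance to the end (0: none, 1: ' or ', >=2: ', ') and collecting entries and separators in a flat pieces list that is reversed and joined once, instead of A's forward index loop that appends to a string and picks the separator by comparing i+2 with len(optns).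
import Mathlib
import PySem

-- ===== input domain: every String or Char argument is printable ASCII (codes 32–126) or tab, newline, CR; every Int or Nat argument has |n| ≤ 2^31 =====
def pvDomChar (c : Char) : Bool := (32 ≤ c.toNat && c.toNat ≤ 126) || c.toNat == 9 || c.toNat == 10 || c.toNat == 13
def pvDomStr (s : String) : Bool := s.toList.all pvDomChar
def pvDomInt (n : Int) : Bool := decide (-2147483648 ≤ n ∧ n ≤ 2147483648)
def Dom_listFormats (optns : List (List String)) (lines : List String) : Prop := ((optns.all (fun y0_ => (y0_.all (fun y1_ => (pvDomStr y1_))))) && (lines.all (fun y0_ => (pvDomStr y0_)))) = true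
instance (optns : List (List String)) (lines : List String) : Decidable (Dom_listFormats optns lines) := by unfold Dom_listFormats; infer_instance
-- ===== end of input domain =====

-- B builds the result back-to-front: it walks optns reversed, picks each separator from its
-- distance to the end, collects everything in a flat pieces list and joins once (objective: alternative).

-- ===== PORT A =====
-- indexing is total via pyGetD; Pre_listFormats keeps every index in range,
-- exactly where the Python returns without IndexError.
def useFormat (separators : List String) (values : List String) : String :=
  (List.range values.length).foldl
    (fun send i =>
      send ++ PySem.List.pyGetD values ((i : Nat) : Int) ""
           ++ PySem.List.pyGetD separators (((i + 1 : Nat)) : Int) "")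
    (PySem.List.pyGetD separators 0 "")

def listFormats (optns : List (List String)) (lines : List String) : String :=
  (List.range optns.length).foldl
    (fun send i =>
      let send2 := send ++ "´" ++ useFormat lines (PySem.List.pyGetD optns ((i : Nat) : Int) []) ++ "´"
      if i + 2 < optns.length then send2 ++ ", "
      else if i + 2 = optns.length then send2 ++ " or "
      else send2)
    ""

-- ===== PORT B =====
-- B's entry expression: ´lines[0] + "".join(v+s for v,s in zip(o, tail))´, tail = lines[1:] hoisted
def entryB (lines : List String) (tail : List String) (o : List String) : String :=
  "´" ++ PySem.List.pyGetD lines 0 ""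
      ++ PySem.Str.join "" ((o.zip tail).map (fun p => p.1 ++ p.2))
      ++ "´"

-- one iteration of B's loop over reversed(optns): state = (out pieces, k)
def stepB (lines : List String) (tail : List String) (st : List String × Nat) (o : List String) : List String × Nat :=
  let out := if st.2 = 1 then st.1 ++ [" or "]
             else if 2 ≤ st.2 then st.1 ++ [", "]
             else st.1
  (out ++ [entryB lines tail o], st.2 + 1)

def listFormats_alt (optns : List (List String)) (lines : List String) : String :=
  let tail := PySem.List.slice lines (some 1) none
  PySem.Str.join "" ((optns.reverse.foldl (stepB lines tail) ([], 0)).1).reverse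

-- ===== PRECONDITION & SPEC =====
-- Pre_ excludes exactly the inputs on which A raises IndexError: some option needs more
-- separators than lines provides (lines[0] or lines[i+1] out of range).
def Pre_listFormats (optns : List (List String)) (lines : List String) : Prop :=
  ∀ o ∈ optns, o.length + 1 ≤ lines.length
instance (optns : List (List String)) (lines : List String) : Decidable (Pre_listFormats optns lines) := by unfold Pre_listFormats; infer_instance

def pvWitness_listFormats : List (List String) × List String := ([[" a"], ["b", "c"]], ["x", "-", "+"])

def Spec_listFormats (optns : List (List String)) (lines : List String) (out : String) : Prop := out = listFormats_alt optns lines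
instance (optns : List (List String)) (lines : List String) (out : String) : Decidable (Spec_listFormats optns lines out) := by unfold Spec_listFormats; infer_instance

-- ===== CLAIM (what is proved, stated in full; the proofs are below) =====
def Claim_equal_listFormats : Prop := ∀ (optns : List (List String)) (lines : List String), Dom_listFormats optns lines → Pre_listFormats optns lines → Spec_listFormats optns lines (listFormats optns lines)

-- ===== LEMMAS AND PROOFS =====

-- PySem.Str.join specialisations (via the Chars bridge)
lemma strJoin_nil (sep : String) : PySem.Str.join sep [] = "" := by
  apply String.toList_inj.mp
  simp [pysem, PySem.Chars.join_nil]

lemma strJoin_singleton (sep a : String) : PySem.Str.join sep [a] = a := by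
  apply String.toList_inj.mp
  simp [pysem, PySem.Chars.join_singleton]

lemma strJoin_cons_cons (sep a b : String) (l : List String) :
    PySem.Str.join sep (a :: b :: l) = a ++ sep ++ PySem.Str.join sep (b :: l) := by
  apply String.toList_inj.mp
  simp [pysem, PySem.Chars.join_cons_cons]

lemma strJoin_empty_cons (a : String) (l : List String) :
    PySem.Str.join "" (a :: l) = a ++ PySem.Str.join "" l := by
  cases l with
  | nil => simp [strJoin_singleton, strJoin_nil]
  | cons b t => rw [strJoin_cons_cons]; simp

lemma strJoin_empty_append (l1 l2 : List String) :
    PySem.Str.join "" (l1 ++ l2) = PySem.Str.join "" l1 ++ PySem.Str.join "" l2 := by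
  induction l1 with
  | nil => simp [strJoin_nil]
  | cons a t ih =>
      simp only [List.cons_append]
      rw [strJoin_empty_cons, strJoin_empty_cons, ih, String.append_assoc]

-- pull the accumulator out of an append-only fold over range (two appended pieces per step)
lemma foldl_range_out2 (g h : Nat → String) :
    ∀ (n : Nat) (acc : String),
      (List.range n).foldl (fun s i => s ++ g i ++ h i) acc
        = acc ++ (List.range n).foldl (fun s i => s ++ g i ++ h i) "" := by
  intro n
  induction n with
  | zero => intro acc; simp
  | succ n ih =>
      intro acc
      simp only [List.range_succ, List.foldl_append, List.foldl_cons, List.foldl_nil]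
      rw [ih acc, ih ("" : String)]
      simp [String.append_assoc]

-- peel off index 0 of a fold over range (n+1)
lemma foldl_range_shift (f : String → Nat → String) (n : Nat) (acc : String) :
    (List.range (n + 1)).foldl f acc
      = (List.range n).foldl (fun s i => f s (i + 1)) (f acc 0) := by
  rw [List.range_succ_eq_map]
  simp [List.foldl_map]

-- useFormat with its total indexing spelled as List.getD
lemma useFormat_getD (separators values : List String) :
    useFormat separators values
      = (List.range values.length).foldl
          (fun s i => s ++ values.getD i "" ++ separators.getD (i + 1) "")
          (separators.getD 0 "") := by
  unfold useFormat
  simp only [PySem.List.pyGetD_natCast, PySem.List.pyGetD_zero]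

-- useFormat equals head ++ join-of-zip whenever all indices are in range
lemma useFormat_eq (vals : List String) :
    ∀ (seps : List String), vals.length + 1 ≤ seps.length →
      useFormat seps vals
        = seps.headD "" ++ PySem.Str.join "" ((vals.zip seps.tail).map (fun p => p.1 ++ p.2)) := by
  induction vals with
  | nil =>
      intro seps h
      cases seps with
      | nil => simp at h
      | cons s ss => simp [useFormat_getD, strJoin_nil]
  | cons v vs ih =>
      intro seps h
      cases seps with
      | nil => simp at h
      | cons s0 rest =>
        cases rest with
        | nil => simp at h
        | cons s1 ss =>
            have hlen : vs.length + 1 ≤ (s1 :: ss).length := by simp at h ⊢; omega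
            rw [useFormat_getD]
            simp only [List.length_cons]
            rw [foldl_range_shift]
            simp only [List.getD_cons_zero, List.getD_cons_succ, Nat.zero_add]
            rw [foldl_range_out2 (fun i => vs.getD i "") (fun i => ss.getD i "")]
            have hA : useFormat (s1 :: ss) vs
                = s1 ++ (List.range vs.length).foldl
                    (fun s i => s ++ vs.getD i "" ++ ss.getD i "") "" := by
              rw [useFormat_getD]
              simp only [List.getD_cons_zero, List.getD_cons_succ]
              rw [foldl_range_out2 (fun i => vs.getD i "") (fun i => ss.getD i "")]
            have hF : (List.range vs.length).foldl
                (fun s i => s ++ vs.getD i "" ++ ss.getD i "") ""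
                = PySem.Str.join "" ((vs.zip ss).map (fun p => p.1 ++ p.2)) := by
              have hBi := ih (s1 :: ss) hlen
              rw [hA] at hBi
              simp only [List.headD_cons, List.tail_cons] at hBi
              have h2 := congrArg String.toList hBi
              simp only [String.toList_append] at h2
              apply String.toList_inj.mp
              exact List.append_cancel_left h2
            rw [hF]
            simp only [List.headD_cons, List.tail_cons, List.zip_cons_cons, List.map_cons]
            rw [strJoin_empty_cons]
            simp [String.append_assoc]

-- A's separator after entry i, and A's whole entry at index i
def sepA (n i : Nat) : String :=
  if i + 2 < n then ", " else if i + 2 = n then " or " else ""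

def gA (optns : List (List String)) (lines : List String) (i : Nat) : String :=
  "´" ++ useFormat lines (optns.getD i []) ++ "´" ++ sepA optns.length i

def Asum (g : Nat → String) (n : Nat) : String :=
  (List.range n).foldl (fun s i => s ++ g i) ""

lemma foldl_range_out1 (g : Nat → String) :
    ∀ (n : Nat) (acc : String),
      (List.range n).foldl (fun s i => s ++ g i) acc
        = acc ++ (List.range n).foldl (fun s i => s ++ g i) "" := by
  intro n
  induction n with
  | zero => intro acc; simp
  | succ n ih =>
      intro acc
      simp only [List.range_succ, List.foldl_append, List.foldl_cons, List.foldl_nil]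
      rw [ih acc, ih ("" : String)]
      simp [String.append_assoc]

lemma Asum_succ (g : Nat → String) (n : Nat) :
    Asum g (n + 1) = g 0 ++ Asum (fun i => g (i + 1)) n := by
  unfold Asum
  rw [foldl_range_shift, foldl_range_out1 (fun i => g (i + 1))]
  simp

lemma listFormats_eq_Asum (optns : List (List String)) (lines : List String) :
    listFormats optns lines = Asum (gA optns lines) optns.length := by
  unfold listFormats Asum
  congr 1
  funext s i
  simp only [PySem.List.pyGetD_natCast, gA, sepA]
  split_ifs <;> simp [String.append_assoc]

lemma gA_cons_succ (a : List String) (rest : List (List String)) (lines : List String) (i : Nat) :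
    gA (a :: rest) lines (i + 1) = gA rest lines i := by
  unfold gA sepA
  simp only [List.getD_cons_succ, List.length_cons]
  congr 1
  split_ifs <;> first | rfl | omega

lemma listFormats_cons (a : List String) (rest : List (List String)) (lines : List String) :
    listFormats (a :: rest) lines
      = "´" ++ useFormat lines a ++ "´" ++ sepA (rest.length + 1) 0 ++ listFormats rest lines := by
  rw [listFormats_eq_Asum, listFormats_eq_Asum]
  simp only [List.length_cons]
  rw [Asum_succ]
  have hsh : (fun i => gA (a :: rest) lines (i + 1)) = gA rest lines := by
    funext i; exact gA_cons_succ a rest lines i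
  rw [hsh]
  unfold gA
  simp [String.append_assoc]

-- A's entry equals B's entry whenever the indices are in range
lemma entry_eq (lines o : List String) (h : o.length + 1 ≤ lines.length) :
    "´" ++ useFormat lines o ++ "´" = entryB lines lines.tail o := by
  rw [useFormat_eq o lines h]
  unfold entryB
  rw [PySem.List.pyGetD_zero]
  have hh : lines.getD 0 "" = lines.headD "" := by cases lines <;> simp
  rw [hh]
  simp [String.append_assoc]

-- B's separator pieces appended at distance-from-end k, and their joined string
def sList (k : Nat) : List String :=
  if k = 1 then [" or "] else if 2 ≤ k then [", "] else []

def sepStr (k : Nat) : String :=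
  if k = 1 then " or " else if 2 ≤ k then ", " else ""

lemma stepB_eq (lines tail : List String) (out : List String) (k : Nat) (o : List String) :
    stepB lines tail (out, k) o = (out ++ sList k ++ [entryB lines tail o], k + 1) := by
  unfold stepB sList
  split_ifs <;> simp

-- B's fold: the pieces accumulator factors out, and k counts the steps
lemma foldB_out (lines tail : List String) :
    ∀ (l : List (List String)) (out0 : List String) (k0 : Nat),
      l.foldl (stepB lines tail) (out0, k0)
        = (out0 ++ (l.foldl (stepB lines tail) ([], k0)).1, k0 + l.length) := by
  intro l
  induction l with
  | nil => intro out0 k0; simp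
  | cons o t ih =>
      intro out0 k0
      simp only [List.foldl_cons, stepB_eq, List.nil_append]
      rw [ih (out0 ++ sList k0 ++ [entryB lines tail o]) (k0 + 1),
          ih (sList k0 ++ [entryB lines tail o]) (k0 + 1)]
      simp [List.append_assoc, List.length_cons]
      omega

-- B's recursion: head entry, then its separator (by distance to the end), then the rest
lemma listFormats_alt_cons (a : List String) (rest : List (List String)) (lines : List String) :
    listFormats_alt (a :: rest) lines
      = entryB lines lines.tail a ++ sepStr rest.length ++ listFormats_alt rest lines := by
  have hdef : ∀ (l : List (List String)), listFormats_alt l lines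
      = PySem.Str.join "" ((l.reverse.foldl (stepB lines lines.tail) ([], 0)).1).reverse := by
    intro l; unfold listFormats_alt; rw [PySem.List.slice_from_one]
  rw [hdef, hdef, List.reverse_cons, List.foldl_append]
  rw [foldB_out lines lines.tail rest.reverse [] 0]
  simp only [List.foldl_cons, List.foldl_nil, List.nil_append, List.length_reverse, Nat.zero_add]
  rw [stepB_eq]
  simp only [List.reverse_append, List.reverse_cons, List.reverse_nil, List.nil_append]
  rw [strJoin_empty_append, strJoin_empty_append, strJoin_empty_cons, strJoin_nil]
  have hs : PySem.Str.join "" (sList rest.length).reverse = sepStr rest.length := by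
    unfold sList sepStr
    split_ifs <;> simp [strJoin_singleton, strJoin_nil]
  rw [hs]
  simp [String.append_assoc]

-- A's separator at position 0 of a list of length m+1 is B's separator at distance m
lemma sepA_eq_sepStr (m : Nat) : sepA (m + 1) 0 = sepStr m := by
  unfold sepA sepStr
  split_ifs <;> first | rfl | omega

-- main equivalence, by structural induction on optns
lemma main_eq (optns : List (List String)) (lines : List String)
    (hpre : ∀ o ∈ optns, o.length + 1 ≤ lines.length) :
    listFormats optns lines = listFormats_alt optns lines := by
  induction optns with
  | nil => rfl
  | cons a rest ih =>
      have ha : a.length + 1 ≤ lines.length := hpre a (by simp)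
      have hrest : ∀ o ∈ rest, o.length + 1 ≤ lines.length := fun o ho => hpre o (by simp [ho])
      rw [listFormats_cons, listFormats_alt_cons, ih hrest, entry_eq lines a ha,
          sepA_eq_sepStr]

-- ===== VERDICT (by name: the statement is the Claim_ definition above) =====
theorem listFormats_spec : Claim_equal_listFormats := by
  intro optns lines _ hpre
  unfold Spec_listFormats
  exact main_eq optns lines hpre
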